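-- pv_equiv track=rewrite | github.com/StaticSnap/CptS-437-Basketball-Game-Predictor | Source Code/CleanData.py | final_two
-- ===== SOURCE A (Python) =====
-- def final_two(time):
--     if time < 2800:
--         valid_ranges = [
--             (10 * 60, 12 * 60),
--             (22 * 60, 24 * 60),
--             (34 * 60, 36 * 60),
--             (46 * 60, 48 * 60),
--         ]
--         return any(start <= time <= end for start, end in valid_ranges)
--     else:
--         base_time = 2800
--         interval_start = base_time + 3 * 60
--         interval_end = base_time + 5 * 60
--         offset = time - interval_start
--         return 0 <= offset % (5 * 60) < (2 * 60)
-- ===== SOURCE B (Python) =====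
-- def final_two(time):
--     if time < 2800:
--         # the four ranges are 600 + 720*k .. +120 wide, for k = 0..3
--         return time >= 600 and (time - 600) % 720 <= 120
--     else:
--         return (time - 2980) % (5 * 60) < (2 * 60)
-- ===== Notes on version B (the rewrite author's own statement) =====
-- stated objective: simpler
-- what changed: Replaced the any() scan over the enumerated four-range table with a single closed-form modular test (time >= 600 and (time - 600) % 720 <= 120), mirroring the else branch's style.
import Mathlib
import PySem

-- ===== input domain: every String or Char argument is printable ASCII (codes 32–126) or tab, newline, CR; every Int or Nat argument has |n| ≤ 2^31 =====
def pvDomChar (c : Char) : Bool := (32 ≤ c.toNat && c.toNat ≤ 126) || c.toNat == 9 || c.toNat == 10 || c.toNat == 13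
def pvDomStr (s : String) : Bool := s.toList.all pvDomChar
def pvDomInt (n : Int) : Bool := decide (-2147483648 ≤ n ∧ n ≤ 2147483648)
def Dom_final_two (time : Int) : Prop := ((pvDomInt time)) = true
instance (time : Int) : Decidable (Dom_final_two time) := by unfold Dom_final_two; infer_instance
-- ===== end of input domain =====

-- B replaces the four-range any() scan with one closed-form modular test (objective: simpler).


-- ===== PORT A =====
def final_two (time : Int) : Bool :=
  if time < 2800 then
    -- any(start <= time <= end for start, end in valid_ranges)
    ([(600, 720), (1320, 1440), (2040, 2160), (2760, 2880)] : List (Int × Int)).any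
      (fun p => decide (p.1 ≤ time ∧ time ≤ p.2))
  else
    let offset : Int := time - 2980
    decide (0 ≤ PySem.Int.mod offset 300 ∧ PySem.Int.mod offset 300 < 120)

-- ===== PORT B =====
def final_two_alt (time : Int) : Bool :=
  if time < 2800 then
    decide (time ≥ 600 ∧ PySem.Int.mod (time - 600) 720 ≤ 120)
  else
    decide (PySem.Int.mod (time - 2980) 300 < 120)

-- ===== PRECONDITION & SPEC =====
def Spec_final_two (time : Int) (out : Bool) : Prop := out = final_two_alt time
instance (time : Int) (out : Bool) : Decidable (Spec_final_two time out) := by unfold Spec_final_two; infer_instance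

-- ===== CLAIM (what is proved, stated in full; the proofs are below) =====
def Claim_equal_final_two : Prop := ∀ (time : Int), Dom_final_two time → Spec_final_two time (final_two time)

-- ===== LEMMAS AND PROOFS =====

-- ===== VERDICT (by name: the statement is the Claim_ definition above) =====
theorem final_two_spec : Claim_equal_final_two := by
  intro time _
  unfold Spec_final_two final_two final_two_alt
  split_ifs with h
  · rw [Bool.eq_iff_iff]
    simp only [List.any_cons, List.any_nil, Bool.or_false, Bool.or_eq_true, decide_eq_true_eq,
      PySem.Int.mod_eq_emod_of_pos (by norm_num : (0 : Int) < 720)]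
    omega
  · rw [Bool.eq_iff_iff]
    simp only [decide_eq_true_eq, PySem.Int.mod_eq_emod_of_pos (by norm_num : (0 : Int) < 300)]
    omega
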